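-- pv_equiv track=rewrite | github.com/shakirware/colorful-training-template | src/colorful_training_template/excel_generator/companion_views.py | _build_notes_summary
-- ===== SOURCE A (Python) =====
-- from typing import Any
--
-- def _build_notes_summary(sets: list[dict[str, Any]]) -> str:
--     note_groups: list[str] = []
--
--     for set_data in sets:
--         note = str(set_data.get("notes", "") or "").strip()
--         if not note:
--             continue
--         if not note_groups or note_groups[-1] != note:
--             note_groups.append(note)
--
--     return " | ".join(note_groups)
-- ===== SOURCE B (Python) =====
-- def _build_notes_summary(sets: list[dict], ) -> str:
--     # Stateless staged formulation: instead of a loop that tracks the last kept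
--     # note, compare each cleaned note with its successor via zip; an element is
--     # kept when it differs from the next one, plus the final element.  Within a
--     # run of equal consecutive notes this keeps the LAST occurrence where A keeps
--     # the first, but the values are equal, so the joined result is identical.
--     cleaned = [n for n in (str(s.get("notes", "") or "").strip() for s in sets) if n]
--     keep = [x for x, nxt in zip(cleaned, cleaned[1:]) if x != nxt]
--     return " | ".join(keep + cleaned[-1:])
-- ===== Notes on version B (the rewrite author's own statement) =====
-- stated objective: alternative
-- what changed: Replaces A's stateful accumulator loop (appending when the note differs from the last kept element) by a stateless pairwise formulation: zip the cleaned notes with their successors and keep each note that differs from the next one, plus the final note; this keeps the last element of each run instead of the first, which is the same value.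
import Mathlib
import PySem

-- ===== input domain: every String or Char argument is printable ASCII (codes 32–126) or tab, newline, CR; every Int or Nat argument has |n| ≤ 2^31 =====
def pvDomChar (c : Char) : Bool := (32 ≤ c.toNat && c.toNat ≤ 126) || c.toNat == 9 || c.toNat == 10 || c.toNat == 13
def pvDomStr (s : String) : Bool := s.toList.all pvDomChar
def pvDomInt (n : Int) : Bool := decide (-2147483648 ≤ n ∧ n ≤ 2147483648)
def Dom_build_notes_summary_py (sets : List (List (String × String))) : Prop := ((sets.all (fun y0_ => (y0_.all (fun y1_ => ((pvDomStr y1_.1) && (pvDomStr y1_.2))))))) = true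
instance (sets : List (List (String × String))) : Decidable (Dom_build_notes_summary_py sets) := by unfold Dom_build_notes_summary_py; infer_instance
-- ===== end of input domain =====

-- B replaces A's stateful accumulator loop by a stateless pairwise formulation: keep each
-- cleaned note that differs from its successor, plus the last one; same cost, alternative shape.

-- ===== PORT A =====
-- `str(set_data.get("notes", "") or "")` on string values is the value itself (`v or ""` is `v`
-- for v ≠ "" and `""` otherwise, and `str` is the identity on strings), so the port strips the
-- looked-up value directly.  `note_groups[-1]` on the nonempty list is its last element; when
-- note_groups is empty the `or` short-circuits, exactly as in Python.
def build_notes_summary_py (sets : List (List (String × String))) : String :=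
  let note_groups :=
    sets.foldl (fun note_groups set_data =>
      let note := PySem.Str.strip (PySem.Dict.getD (PySem.Dict.mk set_data) "notes" "")
      if note = "" then note_groups
      else if note_groups = [] ∨ PySem.List.pyGetD note_groups (-1) "" ≠ note then
        note_groups ++ [note]
      else note_groups) []
  PySem.Str.join " | " note_groups

-- ===== PORT B =====
-- cleaned = [n for n in (str(s.get("notes","") or "").strip() for s in sets) if n]
def pvCleaned (sets : List (List (String × String))) : List String :=
  sets.filterMap (fun s =>
    let n := PySem.Str.strip (PySem.Dict.getD (PySem.Dict.mk s) "notes" "")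
    if n = "" then none else some n)

def build_notes_summary_py_alt (sets : List (List (String × String))) : String :=
  let cleaned := pvCleaned sets
  -- keep = [x for x, nxt in zip(cleaned, cleaned[1:]) if x != nxt]
  let keep := (cleaned.zip (PySem.List.slice cleaned (some 1) none)).filterMap
    (fun p => if p.1 ≠ p.2 then some p.1 else none)
  -- " | ".join(keep + cleaned[-1:])
  PySem.Str.join " | " (keep ++ PySem.List.slice cleaned (some (-1)) none)

-- ===== PRECONDITION & SPEC =====
def Spec_build_notes_summary_py (sets : List (List (String × String))) (out : String) : Prop := out = build_notes_summary_py_alt sets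
instance (sets : List (List (String × String))) (out : String) : Decidable (Spec_build_notes_summary_py sets out) := by unfold Spec_build_notes_summary_py; infer_instance

-- ===== CLAIM (what is proved, stated in full; the proofs are below) =====
def Claim_equal_build_notes_summary_py : Prop := ∀ (sets : List (List (String × String))), Dom_build_notes_summary_py sets → Spec_build_notes_summary_py sets (build_notes_summary_py sets)

-- ===== LEMMAS AND PROOFS =====

theorem pvGetD_singleton_neg_one (a d : String) : PySem.List.pyGetD [a] (-1) d = a := by
  simpa using PySem.List.pyGetD_neg_one_append_singleton (xs := ([] : List String)) (x := a) (d := d)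

-- the first-of-each-run collapse, as a recursion on the cleaned list (proof intermediary)
def pvGroupKeys : List String → List String
  | [] => []
  | [x] => [x]
  | x :: y :: rest => if x = y then pvGroupKeys (y :: rest) else x :: pvGroupKeys (y :: rest)

-- A's loop, abstracted over the list of already-cleaned notes.
def pvColl : List String → List String → List String
  | g, [] => g
  | g, x :: xs =>
      if g = [] ∨ PySem.List.pyGetD g (-1) "" ≠ x then pvColl (g ++ [x]) xs else pvColl g xs

theorem pvColl_foldl (sets : List (List (String × String))) :
    ∀ g : List String,
      sets.foldl (fun note_groups set_data =>
        let note := PySem.Str.strip (PySem.Dict.getD (PySem.Dict.mk set_data) "notes" "")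
        if note = "" then note_groups
        else if note_groups = [] ∨ PySem.List.pyGetD note_groups (-1) "" ≠ note then
          note_groups ++ [note]
        else note_groups) g
      = pvColl g (pvCleaned sets) := by
  induction sets with
  | nil => intro g; simp [pvCleaned, pvColl]
  | cons d ds ih =>
    intro g
    simp only [List.foldl_cons, pvCleaned, List.filterMap_cons]
    by_cases hn : PySem.Str.strip (PySem.Dict.getD (PySem.Dict.mk d) "notes" "") = ""
    · simp [hn, ih g, pvCleaned]
    · by_cases hc : g = [] ∨ PySem.List.pyGetD g (-1) "" ≠ PySem.Str.strip (PySem.Dict.getD (PySem.Dict.mk d) "notes" "")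
      · simpa [hn, hc, pvColl, pvCleaned] using ih (g ++ [PySem.Str.strip (PySem.Dict.getD (PySem.Dict.mk d) "notes" "")])
      · simpa [hn, hc, pvColl, pvCleaned] using ih g

theorem pvColl_append (xs : List String) :
    ∀ (g : List String) (a : String), pvColl (g ++ [a]) xs = g ++ pvColl [a] xs := by
  induction xs with
  | nil => intro g a; simp [pvColl]
  | cons x xs ih =>
    intro g a
    by_cases hax : a = x
    · subst hax
      have h1 : pvColl (g ++ [a]) (a :: xs) = pvColl (g ++ [a]) xs := by
        simp only [pvColl]
        rw [if_neg (by simp [PySem.List.pyGetD_neg_one_append_singleton])]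
      have h2 : pvColl [a] (a :: xs) = pvColl [a] xs := by
        simp only [pvColl]
        rw [if_neg (by simp [pvGetD_singleton_neg_one])]
      rw [h1, h2, ih g a]
    · have h1 : pvColl (g ++ [a]) (x :: xs) = pvColl ((g ++ [a]) ++ [x]) xs := by
        simp only [pvColl]
        rw [if_pos (Or.inr (by rw [PySem.List.pyGetD_neg_one_append_singleton]; exact hax))]
      have h2 : pvColl [a] (x :: xs) = pvColl ([a] ++ [x]) xs := by
        simp only [pvColl]
        rw [if_pos (Or.inr (by rw [pvGetD_singleton_neg_one]; exact hax))]
      rw [h1, ih (g ++ [a]) x, h2, ih [a] x, List.append_assoc]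

theorem pvColl_groupKeys (xs : List String) :
    ∀ a : String, pvColl [a] xs = pvGroupKeys (a :: xs) := by
  induction xs with
  | nil => intro a; simp [pvColl, pvGroupKeys]
  | cons x xs ih =>
    intro a
    by_cases hax : a = x
    · subst hax
      have h2 : pvColl [a] (a :: xs) = pvColl [a] xs := by
        simp only [pvColl]
        rw [if_neg (by simp [pvGetD_singleton_neg_one])]
      rw [h2, ih a]; simp [pvGroupKeys]
    · have h2 : pvColl [a] (x :: xs) = pvColl ([a] ++ [x]) xs := by
        simp only [pvColl]
        rw [if_pos (Or.inr (by rw [pvGetD_singleton_neg_one]; exact hax))]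
      rw [h2, pvColl_append xs [a] x, ih x]
      simp [pvGroupKeys, hax]

theorem pvColl_nil (xs : List String) : pvColl [] xs = pvGroupKeys xs := by
  cases xs with
  | nil => simp [pvColl, pvGroupKeys]
  | cons x xs => simp [pvColl, pvColl_groupKeys]

-- first-of-run collapse equals B's keep-if-differs-from-successor plus last element
theorem pvGroupKeys_eq_zip (xs : List String) :
    pvGroupKeys xs =
      (xs.zip xs.tail).filterMap (fun p => if p.1 ≠ p.2 then some p.1 else none)
        ++ xs.drop (xs.length - 1) := by
  induction xs with
  | nil => simp [pvGroupKeys]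
  | cons x xs ih =>
    cases xs with
    | nil => simp [pvGroupKeys]
    | cons y rest =>
      have hdrop : (x :: y :: rest).drop ((x :: y :: rest).length - 1)
          = (y :: rest).drop ((y :: rest).length - 1) := by
        simp [List.length_cons]
      by_cases hxy : x = y
      · subst hxy
        simp only [pvGroupKeys, if_pos rfl]
        rw [ih, hdrop]
        simp [List.zip_cons_cons]
      · simp only [pvGroupKeys, if_neg hxy]
        rw [ih, hdrop]
        simp [List.zip_cons_cons, hxy]

-- ===== VERDICT (by name: the statement is the Claim_ definition above) =====
theorem build_notes_summary_py_spec : Claim_equal_build_notes_summary_py := by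
  intro sets _
  unfold Spec_build_notes_summary_py build_notes_summary_py build_notes_summary_py_alt
  rw [pvColl_foldl sets [], pvColl_nil, pvGroupKeys_eq_zip]
  simp only [PySem.List.slice_from_one, PySem.List.slice_from_neg_one]
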